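-- pv_equiv track=rewrite | github.com/hnl-ai/hpdstats | ocr_utils.py | correct_ethnicities
-- ===== SOURCE A (Python) =====
-- def correct_ethnicities(ethnicities):
--     ethnicities = list(filter(None, ethnicities))
--     ethnicities = [x.strip() for x in ethnicities]
--     # Rudimentary OCR corrections
--     errors = {
--         "Filipino": ["Filipi", "Filipir"],
--         "Hawaiian": ["Hawe", "Haw:", "Hawai", "Hawaiia", "Hawaiie", "Hav"],
--         "Samoan": ["Sar", "Samoar", "Samoi", "Sarr"],
--         "Hispanic": ["Hispani", "Hispani:", "Hispanir"],
--         "Other": ["Othe", "Othe:", "Other Pac. Isl", "Other Pac. Isl:", "Other P", "Other Asian"],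
--         "Unknown": ["H", "C", "Unkr"],
--         "Indian": ["India"],
--         "Japanese": ["Japa", "Japane:", "Japan", "Japai", "Japanes"],
--         "Native American": ["Native Americ", "Native"],
--         "Chinese": ["Chin"],
--         "Tongan":  ["Ton", "Tong"],
--         "Micronesian": ["Micr"],
--         "Laotian": ["Laotia"],
--         "Middle Eastern": ["Middle Easter", "Middle Easter:"]
--     }
--     corrected_ethnicities = []
--
--     for x in ethnicities:
--         inserted = False
--         for y in errors:
--             if x in errors[y]:
--                 corrected_ethnicities.append(y)
--                 inserted = True
--         if not inserted:
--             corrected_ethnicities.append(x)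
--
--     return corrected_ethnicities
-- ===== SOURCE B (Python) =====
-- # Flat precomputed reverse table (OCR variant -> canonical); variants are
-- # pairwise distinct across A's category lists, so a single dict lookup agrees
-- # with A's nested category scan.
-- _CANONICAL = {
--     "Filipi": "Filipino",
--     "Filipir": "Filipino",
--     "Hawe": "Hawaiian",
--     "Haw:": "Hawaiian",
--     "Hawai": "Hawaiian",
--     "Hawaiia": "Hawaiian",
--     "Hawaiie": "Hawaiian",
--     "Hav": "Hawaiian",
--     "Sar": "Samoan",
--     "Samoar": "Samoan",
--     "Samoi": "Samoan",
--     "Sarr": "Samoan",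
--     "Hispani": "Hispanic",
--     "Hispani:": "Hispanic",
--     "Hispanir": "Hispanic",
--     "Othe": "Other",
--     "Othe:": "Other",
--     "Other Pac. Isl": "Other",
--     "Other Pac. Isl:": "Other",
--     "Other P": "Other",
--     "Other Asian": "Other",
--     "H": "Unknown",
--     "C": "Unknown",
--     "Unkr": "Unknown",
--     "India": "Indian",
--     "Japa": "Japanese",
--     "Japane:": "Japanese",
--     "Japan": "Japanese",
--     "Japai": "Japanese",
--     "Japanes": "Japanese",
--     "Native Americ": "Native American",
--     "Native": "Native American",
--     "Chin": "Chinese",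
--     "Ton": "Tongan",
--     "Tong": "Tongan",
--     "Micr": "Micronesian",
--     "Laotia": "Laotian",
--     "Middle Easter": "Middle Eastern",
--     "Middle Easter:": "Middle Eastern",
-- }
--
--
-- def correct_ethnicities(ethnicities):
--     # One pass: drop falsy entries, strip, and normalize via the flat table.
--     out = []
--     for raw in ethnicities:
--         if raw:
--             x = raw.strip()
--             out.append(_CANONICAL.get(x, x))
--     return out
-- ===== Notes on version B (the rewrite author's own statement) =====
-- stated objective: faster
-- what changed: B precomputes a flat variant-to-canonical dict as module-level data and replaces A's staged filter/strip passes plus nested per-item scan over all categories (with an 'inserted' flag) by one fused loop doing a single table.get(x, x) per item.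
import Mathlib
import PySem

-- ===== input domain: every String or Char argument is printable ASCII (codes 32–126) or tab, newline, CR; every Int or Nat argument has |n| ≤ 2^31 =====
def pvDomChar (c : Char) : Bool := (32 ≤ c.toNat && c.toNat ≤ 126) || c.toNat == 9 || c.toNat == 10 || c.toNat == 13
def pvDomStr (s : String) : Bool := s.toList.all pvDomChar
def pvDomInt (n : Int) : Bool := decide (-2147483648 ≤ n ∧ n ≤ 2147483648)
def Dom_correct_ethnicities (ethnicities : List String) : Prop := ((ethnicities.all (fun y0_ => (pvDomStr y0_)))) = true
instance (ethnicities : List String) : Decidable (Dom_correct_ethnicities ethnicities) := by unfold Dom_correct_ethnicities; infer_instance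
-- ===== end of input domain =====

-- B replaces A's nested per-item scan over the category dict (with an 'inserted' flag)
-- by one fused pass with a flat precomputed variant->canonical table; same return values.
set_option maxRecDepth 4000


-- ===== PORT A =====
-- the 'errors' dict literal of A (insertion order preserved)
def errorsA : List (String × List String) :=
  [("Filipino", ["Filipi", "Filipir"]),
   ("Hawaiian", ["Hawe", "Haw:", "Hawai", "Hawaiia", "Hawaiie", "Hav"]),
   ("Samoan", ["Sar", "Samoar", "Samoi", "Sarr"]),
   ("Hispanic", ["Hispani", "Hispani:", "Hispanir"]),
   ("Other", ["Othe", "Othe:", "Other Pac. Isl", "Other Pac. Isl:", "Other P", "Other Asian"]),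
   ("Unknown", ["H", "C", "Unkr"]),
   ("Indian", ["India"]),
   ("Japanese", ["Japa", "Japane:", "Japan", "Japai", "Japanes"]),
   ("Native American", ["Native Americ", "Native"]),
   ("Chinese", ["Chin"]),
   ("Tongan", ["Ton", "Tong"]),
   ("Micronesian", ["Micr"]),
   ("Laotian", ["Laotia"]),
   ("Middle Eastern", ["Middle Easter", "Middle Easter:"])]

def correct_ethnicities (ethnicities : List String) : List String :=
  -- ethnicities = list(filter(None, ethnicities));  [x.strip() for x in ethnicities]
  let eth := (ethnicities.filter (fun s => s ≠ "")).map PySem.Str.strip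
  -- for x in eth: inner loop over the dict with the 'inserted' flag
  eth.foldl (fun corrected x =>
    let p := errorsA.foldl
      (fun (p : List String × Bool) yv =>
        if x ∈ yv.2 then (p.1 ++ [yv.1], true) else p)
      (corrected, false)
    if p.2 then p.1 else p.1 ++ [x]) []

-- ===== PORT B =====
-- B's flat module-level table _CANONICAL (a dict literal, insertion order)
def canonicalB : PySem.Dict String String := PySem.Dict.mk
  [("Filipi", "Filipino"), ("Filipir", "Filipino"),
   ("Hawe", "Hawaiian"), ("Haw:", "Hawaiian"), ("Hawai", "Hawaiian"),
   ("Hawaiia", "Hawaiian"), ("Hawaiie", "Hawaiian"), ("Hav", "Hawaiian"),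
   ("Sar", "Samoan"), ("Samoar", "Samoan"), ("Samoi", "Samoan"), ("Sarr", "Samoan"),
   ("Hispani", "Hispanic"), ("Hispani:", "Hispanic"), ("Hispanir", "Hispanic"),
   ("Othe", "Other"), ("Othe:", "Other"), ("Other Pac. Isl", "Other"),
   ("Other Pac. Isl:", "Other"), ("Other P", "Other"), ("Other Asian", "Other"),
   ("H", "Unknown"), ("C", "Unknown"), ("Unkr", "Unknown"),
   ("India", "Indian"),
   ("Japa", "Japanese"), ("Japane:", "Japanese"), ("Japan", "Japanese"),
   ("Japai", "Japanese"), ("Japanes", "Japanese"),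
   ("Native Americ", "Native American"), ("Native", "Native American"),
   ("Chin", "Chinese"),
   ("Ton", "Tongan"), ("Tong", "Tongan"),
   ("Micr", "Micronesian"),
   ("Laotia", "Laotian"),
   ("Middle Easter", "Middle Eastern"), ("Middle Easter:", "Middle Eastern")]

-- one fused pass: drop falsy entries, strip, normalize via the flat table
def correct_ethnicities_alt : List String → List String
  | [] => []
  | raw :: rest =>
    if raw ≠ "" then
      let x := PySem.Str.strip raw
      canonicalB.getD x x :: correct_ethnicities_alt rest
    else
      correct_ethnicities_alt rest

-- ===== PRECONDITION & SPEC =====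
def Spec_correct_ethnicities (ethnicities : List String) (out : List String) : Prop := out = correct_ethnicities_alt ethnicities
instance (ethnicities : List String) (out : List String) : Decidable (Spec_correct_ethnicities ethnicities out) := by unfold Spec_correct_ethnicities; infer_instance

-- ===== CLAIM (what is proved, stated in full; the proofs are below) =====
def Claim_equal_correct_ethnicities : Prop := ∀ (ethnicities : List String), Dom_correct_ethnicities ethnicities → Spec_correct_ethnicities ethnicities (correct_ethnicities ethnicities)

-- ===== LEMMAS AND PROOFS =====

-- A's inner-loop step, and the reverse table obtained by folding a correction list
def stepA (x : String) (p : List String × Bool) (yv : String × List String) : List String × Bool :=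
  if x ∈ yv.2 then (p.1 ++ [yv.1], true) else p

def buildT (d : PySem.Dict String String) (errs : List (String × List String)) : PySem.Dict String String :=
  errs.foldl (fun d yv => yv.2.foldl (fun d v => d.insert v yv.1) d) d

-- if x is none of the variants of errs, A's inner loop leaves the state unchanged
lemma inner_nomatch (x : String) (errs : List (String × List String)) (acc : List String) (b : Bool)
    (hx : x ∉ errs.flatMap (·.2)) :
    errs.foldl (stepA x) (acc, b) = (acc, b) := by
  induction errs with
  | nil => rfl
  | cons yv rest ih =>
    simp only [List.flatMap_cons, List.mem_append, not_or] at hx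
    simp only [List.foldl_cons, stepA, if_neg hx.1]
    exact ih hx.2

-- inserting a run of variants for a category leaves lookups of other strings unchanged
lemma get?_insertAll_nomatch (x y : String) (vs : List String) (d : PySem.Dict String String)
    (hx : x ∉ vs) :
    (vs.foldl (fun d v => d.insert v y) d).get? x = d.get? x := by
  induction vs generalizing d with
  | nil => rfl
  | cons v rest ih =>
    simp only [List.mem_cons, not_or] at hx
    simp only [List.foldl_cons]
    rw [ih _ hx.2, PySem.Dict.get?_insert, if_neg hx.1]

-- looking up one of the inserted variants finds its category
lemma get?_insertAll_mem (x y : String) (vs : List String) (d : PySem.Dict String String)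
    (hx : x ∈ vs) :
    (vs.foldl (fun d v => d.insert v y) d).get? x = some y := by
  induction vs generalizing d with
  | nil => cases hx
  | cons v rest ih =>
    simp only [List.foldl_cons]
    by_cases hr : x ∈ rest
    · exact ih _ hr
    · have hv : x = v := (List.mem_cons.mp hx).resolve_right hr
      rw [get?_insertAll_nomatch x y rest _ hr, PySem.Dict.get?_insert, if_pos hv]

-- building over categories none of whose variants is x leaves get? x unchanged
lemma get?_buildT_nomatch (x : String) (errs : List (String × List String))
    (d : PySem.Dict String String) (hx : x ∉ errs.flatMap (·.2)) :
    (buildT d errs).get? x = d.get? x := by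
  induction errs generalizing d with
  | nil => rfl
  | cons yv rest ih =>
    simp only [List.flatMap_cons, List.mem_append, not_or] at hx
    simp only [buildT, List.foldl_cons] at *
    rw [ih _ hx.2, get?_insertAll_nomatch x yv.1 yv.2 d hx.1]

-- the heart of the equivalence: over any correction list with globally distinct variants,
-- A's flagged inner scan appends exactly the reverse-table lookup
lemma item_core (x : String) (errs : List (String × List String)) (acc : List String)
    (d : PySem.Dict String String)
    (hnd : (errs.flatMap (·.2)).Nodup) (hd : d.get? x = none) :
    (let p := errs.foldl (stepA x) (acc, false)
     if p.2 then p.1 else p.1 ++ [x]) = acc ++ [(buildT d errs).getD x x] := by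
  induction errs generalizing acc d with
  | nil =>
    simp [buildT, PySem.Dict.getD_eq_get?_getD, hd]
  | cons yv rest ih =>
    simp only [List.flatMap_cons, List.nodup_append] at hnd
    obtain ⟨hvs, hrest, hdisj⟩ := hnd
    by_cases hx : x ∈ yv.2
    · have hxr : x ∉ rest.flatMap (·.2) := fun h => hdisj x hx x h rfl
      simp only [List.foldl_cons, stepA, if_pos hx]
      rw [inner_nomatch x rest (acc ++ [yv.1]) true hxr]
      simp only [buildT, List.foldl_cons]
      rw [show (rest.foldl (fun d yv => yv.2.foldl (fun d v => d.insert v yv.1) d)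
            (yv.2.foldl (fun d v => d.insert v yv.1) d)) = buildT (yv.2.foldl (fun d v => d.insert v yv.1) d) rest from rfl,
          PySem.Dict.getD_eq_get?_getD, get?_buildT_nomatch x rest _ hxr,
          get?_insertAll_mem x yv.1 yv.2 d hx]
      rfl
    · simp only [List.foldl_cons, stepA, if_neg hx]
      have hd' : (yv.2.foldl (fun d v => d.insert v yv.1) d).get? x = none := by
        rw [get?_insertAll_nomatch x yv.1 yv.2 d hx]; exact hd
      exact ih acc _ hrest hd'

-- the variants of A's correction dict are globally distinct
lemma errorsA_nodup : (errorsA.flatMap (·.2)).Nodup := by decide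

-- folding A's nested correction dict into a reverse table yields exactly B's flat literal
lemma buildT_errorsA : buildT PySem.Dict.empty errorsA = canonicalB := by decide

-- per-item agreement, instantiated at A's literal data and B's flat table
lemma item_eq (acc : List String) (x : String) :
    (let p := errorsA.foldl (stepA x) (acc, false)
     if p.2 then p.1 else p.1 ++ [x]) = acc ++ [canonicalB.getD x x] := by
  have h := item_core x errorsA acc PySem.Dict.empty errorsA_nodup (by simp [pysem])
  rwa [buildT_errorsA] at h

-- A's outer loop over an already filtered-and-stripped list, against the table lookup map
lemma outer_eq (eth acc : List String) :
    eth.foldl (fun corrected x =>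
      let p := errorsA.foldl (stepA x) (corrected, false)
      if p.2 then p.1 else p.1 ++ [x]) acc
    = acc ++ eth.map (fun x => canonicalB.getD x x) := by
  induction eth generalizing acc with
  | nil => simp
  | cons x xs ih =>
    simp only [List.foldl_cons, List.map_cons]
    rw [item_eq acc x, ih, List.append_assoc]
    rfl

-- B's fused single pass equals the staged filter / strip / lookup pipeline
lemma alt_staged (ethnicities : List String) :
    correct_ethnicities_alt ethnicities
    = ((ethnicities.filter (fun s => s ≠ "")).map PySem.Str.strip).map
        (fun x => canonicalB.getD x x) := by
  induction ethnicities with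
  | nil => rfl
  | cons raw rest ih =>
    by_cases h : raw = ""
    · simp [correct_ethnicities_alt, h, ih]
    · simp [correct_ethnicities_alt, h, ih]

-- ===== VERDICT (by name: the statement is the Claim_ definition above) =====
theorem correct_ethnicities_spec : Claim_equal_correct_ethnicities := by
  intro ethnicities _
  unfold Spec_correct_ethnicities correct_ethnicities
  rw [alt_staged]
  exact outer_eq ((ethnicities.filter (fun s => s ≠ "")).map PySem.Str.strip) []
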